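-- pv_equiv track=rewrite | github.com/j8267643/code-gen | code_gen/security.py | _contains_important_files
-- ===== SOURCE A (Python) =====
-- from typing import List, Dict, Optional
--
-- def _contains_important_files(path: str, files: List[str]) -> bool:
--     """Check if path contains important files"""
--     important_patterns = [
--         "package.json", "requirements.txt", "pyproject.toml",
--         "Cargo.toml", "go.mod", "pom.xml", "build.gradle",
--         ".env", ".gitignore", "Dockerfile", "docker-compose.yml",
--         "README.md", "LICENSE", "CHANGELOG.md"
--     ]
--
--     # Check files list
--     for file in files:
--         for pattern in important_patterns:
--             if pattern in file:
--                 return True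
--
--     # Check path
--     path_lower = path.lower()
--     for pattern in important_patterns:
--         if pattern.lower() in path_lower:
--             return True
--
--     return False
-- ===== SOURCE B (Python) =====
-- from typing import List, Dict, Optional
--
-- _IMPORTANT_PATTERNS = [
--     "package.json", "requirements.txt", "pyproject.toml",
--     "Cargo.toml", "go.mod", "pom.xml", "build.gradle",
--     ".env", ".gitignore", "Dockerfile", "docker-compose.yml",
--     "README.md", "LICENSE", "CHANGELOG.md"
-- ]
--
--
-- def _build_index(patterns):
--     """Index the patterns by their first character."""
--     idx = {}
--     for p in patterns:
--         idx.setdefault(p[0], []).append(p)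
--     return idx
--
--
-- _IDX = _build_index(_IMPORTANT_PATTERNS)
-- _IDX_LOWER = _build_index([p.lower() for p in _IMPORTANT_PATTERNS])
--
--
-- def _scan(s, idx):
--     """Position-major scan: at each position, only patterns whose first
--     character matches the current character are tried with startswith."""
--     for i, c in enumerate(s):
--         for p in idx.get(c, ()):
--             if s.startswith(p, i):
--                 return True
--     return False
--
--
-- def _contains_important_files(path: str, files: List[str]) -> bool:
--     """Check if path contains important files"""
--     for f in files:
--         if _scan(f, _IDX):
--             return True
--     return _scan(path.lower(), _IDX_LOWER)
-- ===== Notes on version B (the rewrite author's own statement) =====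
-- stated objective: alternative
-- what changed: B replaces A's pattern-major nested substring tests ('pattern in file' for each pattern) with a position-major scanning matcher: the patterns are indexed once in a dict keyed by first character, and each string (each file case-sensitively, then the lowered path against lowered patterns) is scanned left to right, trying startswith only for the patterns dispatched by the current character.
import Mathlib
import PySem

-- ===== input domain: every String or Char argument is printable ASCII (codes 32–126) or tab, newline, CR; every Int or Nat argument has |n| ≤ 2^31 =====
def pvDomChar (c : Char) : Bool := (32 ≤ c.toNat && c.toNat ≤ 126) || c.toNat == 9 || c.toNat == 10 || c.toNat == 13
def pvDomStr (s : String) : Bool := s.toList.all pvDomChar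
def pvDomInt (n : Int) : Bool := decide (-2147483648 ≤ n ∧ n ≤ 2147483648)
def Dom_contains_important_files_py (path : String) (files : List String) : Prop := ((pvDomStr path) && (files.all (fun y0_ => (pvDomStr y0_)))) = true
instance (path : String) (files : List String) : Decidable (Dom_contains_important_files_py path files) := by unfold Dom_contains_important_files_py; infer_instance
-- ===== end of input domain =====

-- B replaces A's pattern-major nested substring tests by a position-major scanning matcher:
-- patterns are indexed once in a dict keyed by first character, and each string (files
-- case-sensitively, then the lowered path against lowered patterns) is scanned left to
-- right, trying only the patterns dispatched by the current character; same exact result.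

-- ===== PORT A =====
def impPatterns : List String :=
  ["package.json", "requirements.txt", "pyproject.toml",
   "Cargo.toml", "go.mod", "pom.xml", "build.gradle",
   ".env", ".gitignore", "Dockerfile", "docker-compose.yml",
   "README.md", "LICENSE", "CHANGELOG.md"]

-- inner 'for pattern in important_patterns: if pattern in file: return True'
def aPatLoop (file : String) : List String → Bool
  | [] => false
  | p :: ps => if PySem.Str.isIn p file then true else aPatLoop file ps

-- outer 'for file in files:'
def aFileLoop : List String → Bool
  | [] => false
  | f :: fs => if aPatLoop f impPatterns then true else aFileLoop fs

-- 'for pattern in important_patterns: if pattern.lower() in path_lower: return True'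
def aPathLoop (pathLower : String) : List String → Bool
  | [] => false
  | p :: ps => if PySem.Str.isIn (PySem.Str.lower p) pathLower then true else aPathLoop pathLower ps

def contains_important_files_py (path : String) (files : List String) : Bool :=
  if aFileLoop files then true
  else aPathLoop (PySem.Str.lower path) impPatterns

-- ===== PORT B =====
def impPatternsLower : List String := impPatterns.map PySem.Str.lower

-- _build_index: 'idx.setdefault(p[0], []).append(p)' = insert at key p[0] the old list ++ [p];
-- p[0] on a nonempty pattern is head?; the none branch is unreachable on these literals.
def bBuild (ps : List String) : PySem.Dict Char (List String) :=
  ps.foldl (fun d p =>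
    match p.toList.head? with
    | some c => d.insert c (d.getD c [] ++ [p])
    | none => d) PySem.Dict.empty

-- _scan: 'for i, c in enumerate(s): for p in idx.get(c, ()): if s.startswith(p, i): return True'
-- (startswith(p, i) = p is a prefix of the suffix starting at i, i.e. of the current tail)
def bScan (idx : PySem.Dict Char (List String)) : List Char → Bool
  | [] => false
  | c :: cs =>
    if (idx.getD c []).any (fun p => p.toList.isPrefixOf (c :: cs)) then true
    else bScan idx cs

-- 'for f in files: if _scan(f, _IDX): return True'
def bFiles (idx : PySem.Dict Char (List String)) : List String → Bool
  | [] => false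
  | f :: fs => if bScan idx f.toList then true else bFiles idx fs

def contains_important_files_py_alt (path : String) (files : List String) : Bool :=
  if bFiles (bBuild impPatterns) files then true
  else bScan (bBuild impPatternsLower) (PySem.Str.lower path).toList

-- ===== PRECONDITION & SPEC =====
def Spec_contains_important_files_py (path : String) (files : List String) (out : Bool) : Prop := out = contains_important_files_py_alt path files
instance (path : String) (files : List String) (out : Bool) : Decidable (Spec_contains_important_files_py path files out) := by unfold Spec_contains_important_files_py; infer_instance

-- ===== CLAIM =====
def Claim_equal_contains_important_files_py : Prop := ∀ (path : String) (files : List String), Dom_contains_important_files_py path files → Spec_contains_important_files_py path files (contains_important_files_py path files)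

-- ===== LEMMAS AND PROOFS =====

-- the first-character index groups exactly the patterns starting with that character
lemma pv_build_getD (ps : List String) (c : Char) :
    (bBuild ps).getD c [] = ps.filter (fun p => p.toList.head? == some c) := by
  suffices h : ∀ d : PySem.Dict Char (List String),
      (ps.foldl (fun d p =>
        match p.toList.head? with
        | some c0 => d.insert c0 (d.getD c0 [] ++ [p])
        | none => d) d).getD c []
      = d.getD c [] ++ ps.filter (fun p => p.toList.head? == some c) by
    simpa [bBuild] using h PySem.Dict.empty
  induction ps with
  | nil => intro d; simp
  | cons p ps ih =>
    intro d
    simp only [List.foldl_cons, List.filter_cons]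
    cases hp : p.toList.head? with
    | none => simp [ih]
    | some c0 =>
      rw [ih]
      by_cases hc : c = c0
      · subst hc; simp
      · simp [PySem.Dict.getD_insert, hc, Ne.symm hc]

-- position-major scan with first-char dispatch = "some pattern is an infix"
lemma pv_scan_eq (ps : List String) (hne : ∀ p ∈ ps, p.toList ≠ []) :
    ∀ cs : List Char,
      bScan (bBuild ps) cs = ps.any (fun p => decide (p.toList <:+: cs)) := by
  intro cs
  induction cs with
  | nil =>
    simp only [bScan, List.infix_nil]
    symm
    rw [List.any_eq_false]
    intro p hp
    simp [hne p hp]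
  | cons c cs ih =>
    rw [bScan, show ∀ b x : Bool, (if b = true then true else x) = (b || x) from by decide,
      ih, pv_build_getD, Bool.eq_iff_iff]
    simp only [Bool.or_eq_true, List.any_eq_true, List.mem_filter, decide_eq_true_eq,
      beq_iff_eq, List.isPrefixOf_iff_prefix, List.infix_cons_iff]
    constructor
    · rintro (⟨p, ⟨hp, _⟩, hpre⟩ | ⟨p, hp, hinf⟩)
      · exact ⟨p, hp, Or.inl hpre⟩
      · exact ⟨p, hp, Or.inr hinf⟩
    · rintro ⟨p, hp, hpre | hinf⟩
      · refine Or.inl ⟨p, ⟨hp, ?_⟩, hpre⟩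
        cases hq : p.toList with
        | nil => exact absurd hq (hne p hp)
        | cons d t =>
          rw [hq] at hpre
          exact congrArg some (List.cons_prefix_cons.mp hpre).1
      · exact Or.inr ⟨p, hp, hinf⟩

lemma pv_isIn_decide (p s : String) :
    PySem.Str.isIn p s = decide (p.toList <:+: s.toList) := by
  rw [Bool.eq_iff_iff, PySem.Str.isIn_eq, PySem.Chars.isIn_iff_infix]
  simp

lemma pv_patterns_ne : ∀ p ∈ impPatterns, p.toList ≠ [] := by decide

lemma pv_patternsLower_ne : ∀ p ∈ impPatternsLower, p.toList ≠ [] := by decide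

-- one file: A's inner pattern loop = B's scan of that file
lemma pv_file_eq (f : String) :
    aPatLoop f impPatterns = bScan (bBuild impPatterns) f.toList := by
  rw [pv_scan_eq impPatterns pv_patterns_ne]
  induction impPatterns with
  | nil => rfl
  | cons p ps ih =>
    rw [aPatLoop, List.any_cons, ← ih, pv_isIn_decide]
    split_ifs with h <;> simp [h]

lemma pv_files_eq (fs : List String) :
    aFileLoop fs = bFiles (bBuild impPatterns) fs := by
  induction fs with
  | nil => rfl
  | cons f fs ih => rw [aFileLoop, bFiles, pv_file_eq, ih]

-- the path: A's lowered-pattern loop = B's scan of the lowered path with lowered patterns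
lemma pv_path_eq (pl : String) :
    aPathLoop pl impPatterns = bScan (bBuild impPatternsLower) pl.toList := by
  rw [pv_scan_eq impPatternsLower pv_patternsLower_ne]
  unfold impPatternsLower
  rw [List.any_map]
  induction impPatterns with
  | nil => rfl
  | cons p ps ih =>
    rw [aPathLoop, List.any_cons, ← ih, Function.comp, pv_isIn_decide]
    split_ifs with h <;> simp [PySem.Str.toList_lower] at h <;> simp [h]

-- ===== VERDICT =====
theorem contains_important_files_py_spec : Claim_equal_contains_important_files_py := by
  intro path files _
  unfold Spec_contains_important_files_py contains_important_files_py contains_important_files_py_alt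
  rw [pv_files_eq, pv_path_eq]
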